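-- pv_equiv track=rewrite | github.com/MrBrantCode/unitest_baseline | mut_generate/mist_train_taco/taco_5206/solution.py | optimize_merry_go_round
-- ===== SOURCE A (Python) =====
-- from copy import copy
--
-- def optimize_merry_go_round(passengers):
--     min_ = 10 ** 10
--     point = 0
--     arrmin = []
--     arr = [4, 1, 4, 1, 2, 1, 2, 1]
--
--     for _ in range(8):
--         temp = copy(arr[0])
--         repl = copy(arr[1:8])
--         arr[0:7] = repl
--         arr[7] = temp
--
--         point = sum([j - i if i < j else 0 for (i, j) in zip(arr, passengers)])
--
--         if point == min_:
--             arrmin.append(copy(arr))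
--             min_ = point
--         elif point < min_:
--             arrmin = [copy(arr)]
--             min_ = point
--
--     arrmin = [''.join([str(i) for i in j]) for j in arrmin]
--     amin = min([int(i) for i in arrmin])
--     out = list(str(amin))
--
--     return [int(i) for i in out]
-- ===== SOURCE B (Python) =====
-- def optimize_merry_go_round(passengers):
--     seats = [4, 1, 4, 1, 2, 1, 2, 1]
--     # RANK[k] = position of rotation seats[k:]+seats[:k] in increasing numeric order
--     # of the eight rotations' digit strings (a fixed table, since seats is fixed).
--     RANK = [7, 2, 6, 0, 4, 1, 5, 3]
--     cost = [0] * 8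
--     for i, p in enumerate(passengers[:8]):
--         for k in range(8):
--             extra = p - seats[(i + k) % 8]
--             if extra > 0:
--                 cost[k] += extra
--     best = min(range(8), key=lambda k: (cost[k], RANK[k]))
--     return seats[best:] + seats[:best]
-- ===== Notes on version B (the rewrite author's own statement) =====
-- stated objective: alternative
-- what changed: Instead of materialising and scoring each of A's eight in-place rotations with a running-min tie list and string/int re-parsing, B fills an 8-entry cost table in one transposed scan of the first 8 passengers (cost[k] += max(p_i - seats[(i+k)%8], 0)), then picks the arg-min offset with a precomputed numeric-rank table as integer tie-break and returns the rotation by slicing, with no strings at all. (On inputs where every rotation's cost exceeds A's 10^10 sentinel, excluded by Pre_, A raises ValueError while B still returns the cheapest rotation.)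
import Mathlib
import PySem

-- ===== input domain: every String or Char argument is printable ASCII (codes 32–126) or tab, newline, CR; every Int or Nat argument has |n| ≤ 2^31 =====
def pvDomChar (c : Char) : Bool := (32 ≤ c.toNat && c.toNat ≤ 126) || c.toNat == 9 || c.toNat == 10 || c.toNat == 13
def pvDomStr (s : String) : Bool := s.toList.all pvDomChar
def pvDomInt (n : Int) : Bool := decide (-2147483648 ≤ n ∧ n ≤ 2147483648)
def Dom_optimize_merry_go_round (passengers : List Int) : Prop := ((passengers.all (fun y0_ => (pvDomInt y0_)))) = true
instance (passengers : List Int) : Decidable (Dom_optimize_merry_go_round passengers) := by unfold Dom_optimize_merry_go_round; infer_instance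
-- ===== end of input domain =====

-- B replaces A's eight in-place rotations, running-min tie-list and string/int reparsing by
-- one transposed scan filling an 8-entry cost table, an arg-min offset with a precomputed
-- numeric-rank tie-break table, and a final slice (objective: alternative; no strings).

-- ===== PORT A =====
-- point = sum([j - i if i < j else 0 for (i, j) in zip(arr, passengers)])
def pvPoint (passengers arr : List Int) : Int :=
  ((arr.zip passengers).map (fun ij => if ij.1 < ij.2 then ij.2 - ij.1 else 0)).sum

-- one iteration of A's for-loop (the slice assignment arr[0:7] = arr[1:8]; arr[7] = temp
-- is the left rotation repl ++ [temp], written exactly as those two updates produce it)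
def stepA (passengers : List Int) (st : List Int × Int × List (List Int)) (_i : Int) :
    List Int × Int × List (List Int) :=
  let arr0 := st.1
  let min_ := st.2.1
  let arrmin := st.2.2
  let temp := (PySem.List.pyGet? arr0 0).getD 0
  let repl := PySem.List.slice arr0 (some 1) (some 8)
  let arr := repl ++ [temp]
  let point := pvPoint passengers arr
  if point = min_ then (arr, min_, arrmin ++ [arr])
  else if point < min_ then (arr, point, [arr])
  else (arr, min_, arrmin)

def optimize_merry_go_round (passengers : List Int) : List Int :=
  let st := (PySem.List.pyRange 0 8 1).foldl (stepA passengers)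
      (([4, 1, 4, 1, 2, 1, 2, 1] : List Int), (10 : Int) ^ 10, ([] : List (List Int)))
  let arrminS := st.2.2.map (fun j => PySem.Str.join "" (j.map PySem.Int.toStr))
  let amin := (PySem.List.min? (arrminS.map (fun i => (PySem.Int.ofStr? i).getD 0)) (fun x => x)).getD 0
  ((PySem.Int.toStr amin).toList).map (fun i => (PySem.Int.ofStr? (String.ofList [i])).getD 0)

-- ===== PORT B =====
-- inner 'for k in range(8)': extra = p - seats[(i+k) % 8]; if extra > 0: cost[k] += extra
def stepInnerB (i p : Int) (c : List Int) (k : Int) : List Int :=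
  let extra := p - (PySem.List.pyGet? ([4, 1, 4, 1, 2, 1, 2, 1] : List Int)
      (PySem.Int.mod (i + k) 8)).getD 0
  if 0 < extra then PySem.List.pySetD c k (PySem.List.pyGetD c k 0 + extra) else c

-- body of 'for i, p in enumerate(passengers[:8])'
def stepOuterB (c : List Int) (ip : Int × Int) : List Int :=
  (PySem.List.pyRange 0 8 1).foldl (stepInnerB ip.1 ip.2) c

def optimize_merry_go_round_alt (passengers : List Int) : List Int :=
  let seats : List Int := [4, 1, 4, 1, 2, 1, 2, 1]
  let rank : List Int := [7, 2, 6, 0, 4, 1, 5, 3]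
  let cost := (PySem.List.enumerate (PySem.List.slice passengers none (some 8)) 0).foldl
      stepOuterB (PySem.List.pyRepeat [0] 8)
  let best := (PySem.List.min2? (PySem.List.pyRange 0 8 1)
      (fun k => PySem.List.pyGetD cost k 0) (fun k => PySem.List.pyGetD rank k 0)).getD 0
  PySem.List.slice seats (some best) none ++ PySem.List.slice seats none (some best)

-- ===== PRECONDITION & SPEC =====
-- Pre_ excludes exactly the inputs on which A RAISES ValueError (min() of an empty list):
-- those where every one of the eight rotations has boarding cost above A's 10^10 sentinel
-- (reachable in Dom only with several passenger counts near 2^31).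
def Pre_optimize_merry_go_round (passengers : List Int) : Prop :=
  ∃ r ∈ ([[4,1,4,1,2,1,2,1], [1,4,1,2,1,2,1,4], [4,1,2,1,2,1,4,1], [1,2,1,2,1,4,1,4],
          [2,1,2,1,4,1,4,1], [1,2,1,4,1,4,1,2], [2,1,4,1,4,1,2,1], [1,4,1,4,1,2,1,2]] :
          List (List Int)),
    ((r.zip passengers).map (fun ij => if ij.1 < ij.2 then ij.2 - ij.1 else 0)).sum ≤ (10 : Int) ^ 10

instance (passengers : List Int) : Decidable (Pre_optimize_merry_go_round passengers) := by
  unfold Pre_optimize_merry_go_round; infer_instance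

def pvWitness_optimize_merry_go_round : List Int := []

def Spec_optimize_merry_go_round (passengers : List Int) (out : List Int) : Prop :=
  out = optimize_merry_go_round_alt passengers
instance (passengers : List Int) (out : List Int) : Decidable (Spec_optimize_merry_go_round passengers out) := by
  unfold Spec_optimize_merry_go_round; infer_instance

-- ===== CLAIM (what is proved, stated in full; the proofs are below) =====
def Claim_equal_optimize_merry_go_round : Prop := ∀ (passengers : List Int), Dom_optimize_merry_go_round passengers → Pre_optimize_merry_go_round passengers → Spec_optimize_merry_go_round passengers (optimize_merry_go_round passengers)

-- ===== LEMMAS AND PROOFS =====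

-- the eight rotations, by offset (B's indexing) and in A's visiting order (i = 1..7, 0)
def pvSeats : List Int := [4, 1, 4, 1, 2, 1, 2, 1]

def pvRotK (k : Nat) : List Int := pvSeats.drop k ++ pvSeats.take k

def pvRotsB : List (List Int) :=
  [[4,1,4,1,2,1,2,1], [1,4,1,2,1,2,1,4], [4,1,2,1,2,1,4,1], [1,2,1,2,1,4,1,4],
   [2,1,2,1,4,1,4,1], [1,2,1,4,1,4,1,2], [2,1,4,1,4,1,2,1], [1,4,1,4,1,2,1,2]]

def pvRotsA : List (List Int) :=
  [[1,4,1,2,1,2,1,4], [4,1,2,1,2,1,4,1], [1,2,1,2,1,4,1,4], [2,1,2,1,4,1,4,1],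
   [1,2,1,4,1,4,1,2], [2,1,4,1,4,1,2,1], [1,4,1,4,1,2,1,2], [4,1,4,1,2,1,2,1]]

def pvRot (arr0 : List Int) : List Int :=
  PySem.List.slice arr0 (some 1) (some 8) ++ [(PySem.List.pyGet? arr0 0).getD 0]

def pvNumB (r : List Int) : Int :=
  (PySem.Int.ofStr? (PySem.Str.join "" (r.map PySem.Int.toStr))).getD 0

-- A's loop body on the (min_, arrmin) part, with the already-rotated arr as input
def stepMS (κ : List Int → Int) (st : Int × List (List Int)) (r : List Int) :
    Int × List (List Int) :=
  if κ r = st.1 then (st.1, st.2 ++ [r]) else if κ r < st.1 then (κ r, [r]) else st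

theorem stepA_eq (p : List Int) (arr0 : List Int) (ms : Int × List (List Int)) (i : Int) :
    stepA p (arr0, ms) i = (pvRot arr0, stepMS (pvPoint p) ms (pvRot arr0)) := by
  unfold stepA stepMS pvRot
  dsimp only
  split_ifs <;> rfl

-- foldl min facts
theorem pvFoldlMin_le_init (l : List Int) : ∀ a : Int, l.foldl min a ≤ a := by
  induction l with
  | nil => intro a; simp
  | cons x t ih => intro a; exact le_trans (ih (min a x)) (min_le_left _ _)

theorem pvFoldlMin_le_mem (l : List Int) : ∀ a x : Int, x ∈ l → l.foldl min a ≤ x := by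
  induction l with
  | nil => intro a x h; simp at h
  | cons y t ih =>
    intro a x h
    rcases List.mem_cons.mp h with h | h
    · subst h; exact le_trans (pvFoldlMin_le_init t _) (min_le_right _ _)
    · exact ih _ _ h

theorem pvFoldlMin_cases (l : List Int) : ∀ a : Int, l.foldl min a = a ∨ l.foldl min a ∈ l := by
  induction l with
  | nil => intro a; left; rfl
  | cons x t ih =>
    intro a
    rcases ih (min a x) with h | h
    · rcases le_total a x with hax | hax
      · left; rw [List.foldl_cons, h, min_eq_left hax]
      · right; rw [List.foldl_cons, h, min_eq_right hax]; exact List.mem_cons_self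
    · right; exact List.mem_cons_of_mem _ h

theorem pvFoldlMin_eq_init (l : List Int) : ∀ a : Int, (∀ x ∈ l, a ≤ x) → l.foldl min a = a := by
  intro a h
  rcases pvFoldlMin_cases l a with h' | h'
  · exact h'
  · exact le_antisymm (pvFoldlMin_le_init l a) (h _ h')

-- invariant of A's running-min / tie-list loop
theorem stepMS_spec (κ : List Int → Int) : ∀ (rs : List (List Int)) (m : Int) (sel : List (List Int)),
    rs.foldl (stepMS κ) (m, sel) =
      ((rs.map κ).foldl min m,
        (if ∀ r ∈ rs, m ≤ κ r then sel else []) ++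
          rs.filter (fun r => decide (κ r = (rs.map κ).foldl min m))) := by
  intro rs
  induction rs with
  | nil => intro m sel; simp
  | cons r rs ih =>
    intro m sel
    have hM := pvFoldlMin_le_init (rs.map κ)
    by_cases h1 : κ r = m
    · have hstep : stepMS κ (m, sel) r = (m, sel ++ [r]) := by unfold stepMS; simp [h1]
      rw [List.foldl_cons, hstep, ih]
      have hmin : min m (κ r) = m := by omega
      simp only [List.map_cons, List.foldl_cons, hmin, List.filter_cons, Prod.mk.injEq,
        true_and]
      by_cases hall : ∀ x ∈ rs, m ≤ κ x
      · have hMeq : (rs.map κ).foldl min m = m := by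
          apply pvFoldlMin_eq_init
          intro x hx
          rcases List.mem_map.mp hx with ⟨y, hy, rfl⟩
          exact hall y hy
        have hall' : ∀ x ∈ r :: rs, m ≤ κ x := by
          intro x hx
          rcases List.mem_cons.mp hx with rfl | hx
          · omega
          · exact hall x hx
        rw [if_pos hall, if_pos hall', if_pos (by simp only [decide_eq_true_eq]; omega)]
        simp
      · have hlt : (rs.map κ).foldl min m < m := by
          push Not at hall
          obtain ⟨y, hy, hylt⟩ := hall
          have := pvFoldlMin_le_mem (rs.map κ) m (κ y) (List.mem_map.mpr ⟨y, hy, rfl⟩)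
          omega
        have hall' : ¬ ∀ x ∈ r :: rs, m ≤ κ x := by
          intro hc
          exact hall (fun x hx => hc x (List.mem_cons_of_mem _ hx))
        rw [if_neg hall, if_neg hall', if_neg (by simp only [decide_eq_true_eq]; omega)]
    · by_cases h2 : κ r < m
      · have hstep : stepMS κ (m, sel) r = (κ r, [r]) := by unfold stepMS; simp [h1, h2]
        rw [List.foldl_cons, hstep, ih]
        have hmin : min m (κ r) = κ r := by omega
        simp only [List.map_cons, List.foldl_cons, hmin, List.filter_cons, Prod.mk.injEq,
          true_and]
        have hall' : ¬ ∀ x ∈ r :: rs, m ≤ κ x := by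
          intro hc
          have := hc r List.mem_cons_self
          omega
        rw [if_neg hall']
        by_cases hall : ∀ x ∈ rs, κ r ≤ κ x
        · have hMeq : (rs.map κ).foldl min (κ r) = κ r := by
            apply pvFoldlMin_eq_init
            intro x hx
            rcases List.mem_map.mp hx with ⟨y, hy, rfl⟩
            exact hall y hy
          rw [if_pos hall, if_pos (by simp only [decide_eq_true_eq]; omega)]
          simp
        · have hlt : (rs.map κ).foldl min (κ r) < κ r := by
            push Not at hall
            obtain ⟨y, hy, hylt⟩ := hall
            have := pvFoldlMin_le_mem (rs.map κ) (κ r) (κ y) (List.mem_map.mpr ⟨y, hy, rfl⟩)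
            omega
          rw [if_neg hall, if_neg (by simp only [decide_eq_true_eq]; omega)]
      · have h3 : m < κ r := by omega
        have hstep : stepMS κ (m, sel) r = (m, sel) := by unfold stepMS; simp [h1]; omega
        rw [List.foldl_cons, hstep, ih]
        have hmin : min m (κ r) = m := by omega
        simp only [List.map_cons, List.foldl_cons, hmin, List.filter_cons, Prod.mk.injEq,
          true_and]
        have hiff : (∀ x ∈ r :: rs, m ≤ κ x) ↔ (∀ x ∈ rs, m ≤ κ x) := by
          constructor
          · intro hc x hx; exact hc x (List.mem_cons_of_mem _ hx)
          · intro hc x hx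
            rcases List.mem_cons.mp hx with rfl | hx
            · omega
            · exact hc x hx
        have hrne : ¬ (κ r = (rs.map κ).foldl min m) := by
          have := hM m
          omega
        have hrne' : ¬ (decide (κ r = (rs.map κ).foldl min m) = true) := by
          simp only [decide_eq_true_eq]; exact hrne
        rw [if_neg hrne']
        by_cases hall : ∀ x ∈ rs, m ≤ κ x
        · rw [if_pos hall, if_pos (hiff.mpr hall)]
        · rw [if_neg hall, if_neg (fun hc => hall (hiff.mp hc))]

-- the eight concrete rotation steps
theorem pvRot_0 : pvRot [4,1,4,1,2,1,2,1] = [1,4,1,2,1,2,1,4] := by decide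
theorem pvRot_1 : pvRot [1,4,1,2,1,2,1,4] = [4,1,2,1,2,1,4,1] := by decide
theorem pvRot_2 : pvRot [4,1,2,1,2,1,4,1] = [1,2,1,2,1,4,1,4] := by decide
theorem pvRot_3 : pvRot [1,2,1,2,1,4,1,4] = [2,1,2,1,4,1,4,1] := by decide
theorem pvRot_4 : pvRot [2,1,2,1,4,1,4,1] = [1,2,1,4,1,4,1,2] := by decide
theorem pvRot_5 : pvRot [1,2,1,4,1,4,1,2] = [2,1,4,1,4,1,2,1] := by decide
theorem pvRot_6 : pvRot [2,1,4,1,4,1,2,1] = [1,4,1,4,1,2,1,2] := by decide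
theorem pvRot_7 : pvRot [1,4,1,4,1,2,1,2] = [4,1,4,1,2,1,2,1] := by decide

theorem pyRange8 : PySem.List.pyRange 0 8 1 = [0, 1, 2, 3, 4, 5, 6, 7] := by decide

-- A's foldl over range(8) is the (min_, arrmin) fold over the rotations it visits
theorem foldA_eq (p : List Int) (m : Int) (sel : List (List Int)) :
    (PySem.List.pyRange 0 8 1).foldl (stepA p) (([4,1,4,1,2,1,2,1] : List Int), m, sel) =
      (([4,1,4,1,2,1,2,1] : List Int), pvRotsA.foldl (stepMS (pvPoint p)) (m, sel)) := by
  rw [pyRange8]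
  simp only [List.foldl_cons, List.foldl_nil, stepA_eq, pvRot_0, pvRot_1, pvRot_2, pvRot_3,
    pvRot_4, pvRot_5, pvRot_6, pvRot_7, pvRotsA]

theorem mem_rotsA_iff (x : List Int) : x ∈ pvRotsA ↔ x ∈ pvRotsB := by
  simp only [pvRotsA, pvRotsB, List.mem_cons, List.not_mem_nil, or_false]
  tauto

-- ===== B-side: the transposed cost accumulation =====

-- per-passenger contribution to offset k when the passenger sits at index i
def pvT (i k p : Int) : Int :=
  max (p - (PySem.List.pyGet? pvSeats (PySem.Int.mod (i + k) 8)).getD 0) 0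

-- total contribution of the (remaining) passengers q, the first sitting at index i
def pvF (q : List Int) (i k : Int) : Int :=
  match q with
  | [] => 0
  | p :: q' => pvT i k p + pvF q' (i + 1) k

theorem pvSetGetD_self (c : List Int) (k : Nat) (h : k < c.length) :
    c.set k (c.getD k 0) = c := by
  apply List.ext_getElem
  · simp
  · intro n h1 h2
    rw [List.getElem_set]
    split_ifs with hn
    · subst hn; rw [List.getD_eq_getElem c 0 h]
    · rfl

theorem stepInnerB_eq (i p : Int) (c : List Int) (k : Nat) (hk : k < c.length) :
    stepInnerB i p c (k : Int) = c.set k (PySem.List.pyGetD c (k : Int) 0 + pvT i (k : Int) p) := by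
  unfold stepInnerB pvT
  dsimp only
  set s := (PySem.List.pyGet? pvSeats (PySem.Int.mod (i + (k : Int)) 8)).getD 0 with hs
  have hseats : (PySem.List.pyGet? ([4,1,4,1,2,1,2,1] : List Int) (PySem.Int.mod (i + (k : Int)) 8)).getD 0 = s := rfl
  rw [hseats]
  by_cases h : 0 < p - s
  · rw [if_pos h]
    have hmax : max (p - s) 0 = p - s := by omega
    rw [hmax, PySem.List.pySetD_natCast]
  · rw [if_neg h]
    have hmax : max (p - s) 0 = 0 := by omega
    rw [hmax, add_zero, PySem.List.pyGetD_natCast]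
    exact (pvSetGetD_self c k hk).symm

theorem inner_eq (i p : Int) (a0 a1 a2 a3 a4 a5 a6 a7 : Int) :
    (PySem.List.pyRange 0 8 1).foldl (stepInnerB i p) [a0, a1, a2, a3, a4, a5, a6, a7] =
      [a0 + pvT i 0 p, a1 + pvT i 1 p, a2 + pvT i 2 p, a3 + pvT i 3 p,
       a4 + pvT i 4 p, a5 + pvT i 5 p, a6 + pvT i 6 p, a7 + pvT i 7 p] := by
  rw [pyRange8]
  simp only [List.foldl_cons, List.foldl_nil]
  rw [show ((0 : Int)) = ((0 : Nat) : Int) from rfl, stepInnerB_eq i p _ 0 (by simp)]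
  rw [show ((1 : Int)) = ((1 : Nat) : Int) from rfl, stepInnerB_eq i p _ 1 (by simp)]
  rw [show ((2 : Int)) = ((2 : Nat) : Int) from rfl, stepInnerB_eq i p _ 2 (by simp)]
  rw [show ((3 : Int)) = ((3 : Nat) : Int) from rfl, stepInnerB_eq i p _ 3 (by simp)]
  rw [show ((4 : Int)) = ((4 : Nat) : Int) from rfl, stepInnerB_eq i p _ 4 (by simp)]
  rw [show ((5 : Int)) = ((5 : Nat) : Int) from rfl, stepInnerB_eq i p _ 5 (by simp)]
  rw [show ((6 : Int)) = ((6 : Nat) : Int) from rfl, stepInnerB_eq i p _ 6 (by simp)]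
  rw [show ((7 : Int)) = ((7 : Nat) : Int) from rfl, stepInnerB_eq i p _ 7 (by simp)]
  rfl

theorem outer_eq (q : List Int) : ∀ (i : Int) (a0 a1 a2 a3 a4 a5 a6 a7 : Int),
    (PySem.List.enumerate q i).foldl stepOuterB [a0, a1, a2, a3, a4, a5, a6, a7] =
      [a0 + pvF q i 0, a1 + pvF q i 1, a2 + pvF q i 2, a3 + pvF q i 3,
       a4 + pvF q i 4, a5 + pvF q i 5, a6 + pvF q i 6, a7 + pvF q i 7] := by
  induction q with
  | nil => intro i a0 a1 a2 a3 a4 a5 a6 a7; simp [PySem.List.enumerate_nil, pvF]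
  | cons p q' ih =>
    intro i a0 a1 a2 a3 a4 a5 a6 a7
    rw [PySem.List.enumerate_cons, List.foldl_cons]
    have hstep : stepOuterB [a0, a1, a2, a3, a4, a5, a6, a7] (i, p) =
        [a0 + pvT i 0 p, a1 + pvT i 1 p, a2 + pvT i 2 p, a3 + pvT i 3 p,
         a4 + pvT i 4 p, a5 + pvT i 5 p, a6 + pvT i 6 p, a7 + pvT i 7 p] := by
      unfold stepOuterB
      exact inner_eq i p a0 a1 a2 a3 a4 a5 a6 a7
    rw [hstep, ih]
    simp [pvF, add_assoc]

-- the drop-j tail of rotation k starts with seats[(j+k) % 8]  (finite fact)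
theorem pvDrop_fact : ∀ j < 8, ∀ k < 8,
    (pvRotK k).drop j =
      ((PySem.List.pyGet? pvSeats (PySem.Int.mod ((j : Int) + (k : Int)) 8)).getD 0)
        :: (pvRotK k).drop (j + 1) := by
  decide

theorem pvF_eq_point : ∀ (q : List Int) (j k : Nat), j + q.length ≤ 8 → k < 8 →
    pvF q (j : Int) (k : Int) = pvPoint q ((pvRotK k).drop j) := by
  intro q
  induction q with
  | nil => intro j k _ _; simp [pvF, pvPoint]
  | cons p q' ih =>
    intro j k hj hk
    have hj8 : j < 8 := by simp at hj; omega
    rw [pvDrop_fact j hj8 k hk]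
    have hstep : pvPoint (p :: q')
        (((PySem.List.pyGet? pvSeats (PySem.Int.mod ((j : Int) + (k : Int)) 8)).getD 0)
          :: (pvRotK k).drop (j + 1)) =
        (if (PySem.List.pyGet? pvSeats (PySem.Int.mod ((j : Int) + (k : Int)) 8)).getD 0 < p
         then p - (PySem.List.pyGet? pvSeats (PySem.Int.mod ((j : Int) + (k : Int)) 8)).getD 0
         else 0) + pvPoint q' ((pvRotK k).drop (j + 1)) := by
      simp [pvPoint]
    rw [hstep]
    have hihj : ((j : Int) + 1) = ((j + 1 : Nat) : Int) := by push_cast; ring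
    have : pvF (p :: q') (j : Int) (k : Int) = pvT (j : Int) (k : Int) p + pvF q' ((j + 1 : Nat) : Int) (k : Int) := by
      rw [show pvF (p :: q') (j : Int) (k : Int) = pvT (j : Int) (k : Int) p + pvF q' ((j : Int) + 1) (k : Int) from rfl, hihj]
    rw [this, ih (j + 1) k (by simp at hj ⊢; omega) hk]
    have hT : pvT (j : Int) (k : Int) p =
        (if (PySem.List.pyGet? pvSeats (PySem.Int.mod ((j : Int) + (k : Int)) 8)).getD 0 < p
         then p - (PySem.List.pyGet? pvSeats (PySem.Int.mod ((j : Int) + (k : Int)) 8)).getD 0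
         else 0) := by
      unfold pvT
      split_ifs with h <;> omega
    rw [hT]

-- zip against a fixed-length left list ignores the tail of the right list
theorem pvZipTake : ∀ (r q : List Int) (n : Nat), r.length ≤ n → r.zip (q.take n) = r.zip q := by
  intro r
  induction r with
  | nil => intro q n _; simp
  | cons x r' ih =>
    intro q n h
    cases q with
    | nil => simp
    | cons y q' =>
      cases n with
      | zero => simp at h
      | succ m =>
        simp only [List.take_succ_cons, List.zip_cons_cons]
        rw [ih q' m (by simp at h; omega)]

-- ===== generic min-with-two-keys facts (PySem.List.min2?) =====

def pvStep2 {α : Type} (k1 k2 : α → Int) (acc : Option α) (x : α) : Option α :=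
  match acc with
  | none => some x
  | some m =>
    if (decide (k1 x < k1 m) || !decide (k1 m < k1 x) && decide (k2 x < k2 m)) = true
    then some x else some m

theorem pvFoldl_congr {α β : Type} (f g : β → α → β) (h : ∀ b a, f b a = g b a) :
    ∀ (l : List α) (b : β), l.foldl f b = l.foldl g b := by
  intro l
  induction l with
  | nil => intro b; rfl
  | cons x t ih => intro b; rw [List.foldl_cons, List.foldl_cons, h, ih]

theorem min2?_cons {α : Type} (k1 k2 : α → Int) (x : α) (xs : List α) :
    PySem.List.min2? (x :: xs) k1 k2 = xs.foldl (pvStep2 k1 k2) (some x) := by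
  unfold PySem.List.min2?
  rw [List.foldl_cons]
  exact pvFoldl_congr _ _ (fun b a => by cases b <;> rfl) xs _

def pvLexLE {α : Type} (k1 k2 : α → Int) (m y : α) : Prop :=
  k1 m < k1 y ∨ (k1 m = k1 y ∧ k2 m ≤ k2 y)

theorem pvStep2_aux {α : Type} (k1 k2 : α → Int) :
    ∀ (xs : List α) (a m : α),
      xs.foldl (pvStep2 k1 k2) (some a) = some m →
      (m = a ∨ m ∈ xs) ∧ pvLexLE k1 k2 m a ∧ ∀ y ∈ xs, pvLexLE k1 k2 m y := by
  intro xs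
  induction xs with
  | nil =>
    intro a m h
    simp only [List.foldl_nil, Option.some.injEq] at h
    subst h
    exact ⟨Or.inl rfl, Or.inr ⟨rfl, le_refl _⟩, by simp⟩
  | cons x t ih =>
    intro a m h
    rw [List.foldl_cons] at h
    by_cases hc : (decide (k1 x < k1 a) || !decide (k1 a < k1 x) && decide (k2 x < k2 a)) = true
    · have hst : pvStep2 k1 k2 (some a) x = some x := by simp only [pvStep2]; rw [if_pos hc]
      rw [hst] at h
      obtain ⟨hmem, hlex, hall⟩ := ih x m h
      simp only [Bool.or_eq_true, Bool.and_eq_true, Bool.not_eq_true', decide_eq_true_eq,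
        decide_eq_false_iff_not] at hc
      have hxa : pvLexLE k1 k2 x a := by
        unfold pvLexLE
        rcases hc with hc | ⟨hc1, hc2⟩
        · exact Or.inl hc
        · rcases lt_trichotomy (k1 x) (k1 a) with h' | h' | h'
          · exact Or.inl h'
          · exact Or.inr ⟨h', le_of_lt hc2⟩
          · omega
      have hma : pvLexLE k1 k2 m a := by
        unfold pvLexLE at hlex hxa ⊢
        omega
      refine ⟨?_, hma, ?_⟩
      · rcases hmem with rfl | hm
        · exact Or.inr List.mem_cons_self
        · exact Or.inr (List.mem_cons_of_mem _ hm)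
      · intro y hy
        rcases List.mem_cons.mp hy with rfl | hy
        · exact hlex
        · exact hall y hy
    · have hst : pvStep2 k1 k2 (some a) x = some a := by simp only [pvStep2]; rw [if_neg hc]
      rw [hst] at h
      obtain ⟨hmem, hlex, hall⟩ := ih a m h
      simp only [Bool.or_eq_true, Bool.and_eq_true, Bool.not_eq_true', decide_eq_true_eq,
        decide_eq_false_iff_not] at hc
      push Not at hc
      have hax : pvLexLE k1 k2 a x := by
        unfold pvLexLE
        obtain ⟨hc1, hc2⟩ := hc
        rcases lt_trichotomy (k1 a) (k1 x) with h' | h' | h'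
        · exact Or.inl h'
        · exact Or.inr ⟨h', by have := hc2 (by omega); omega⟩
        · omega
      refine ⟨?_, hlex, ?_⟩
      · rcases hmem with rfl | hm
        · exact Or.inl rfl
        · exact Or.inr (List.mem_cons_of_mem _ hm)
      · intro y hy
        rcases List.mem_cons.mp hy with rfl | hy
        · unfold pvLexLE at hlex hax ⊢; omega
        · exact hall y hy

theorem pvStep2_some {α : Type} (k1 k2 : α → Int) :
    ∀ (xs : List α) (a : α), ∃ m, xs.foldl (pvStep2 k1 k2) (some a) = some m := by
  intro xs
  induction xs with
  | nil => intro a; exact ⟨a, rfl⟩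
  | cons x t ih =>
    intro a
    by_cases hc : (decide (k1 x < k1 a) || !decide (k1 a < k1 x) && decide (k2 x < k2 a)) = true
    · have hst : pvStep2 k1 k2 (some a) x = some x := by simp only [pvStep2]; rw [if_pos hc]
      rw [List.foldl_cons, hst]; exact ih x
    · have hst : pvStep2 k1 k2 (some a) x = some a := by simp only [pvStep2]; rw [if_neg hc]
      rw [List.foldl_cons, hst]; exact ih a

-- ===== finite facts about the fixed tables =====

def pvRankL : List Int := [7, 2, 6, 0, 4, 1, 5, 3]

-- the rank table orders offsets exactly as the rotations' numeric values
theorem pvRank_fact : ∀ a < 8, ∀ b < 8,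
    (PySem.List.pyGetD pvRankL ((a : Nat) : Int) 0 ≤ PySem.List.pyGetD pvRankL ((b : Nat) : Int) 0
      ↔ pvNumB (pvRotK a) ≤ pvNumB (pvRotK b)) := by
  decide

theorem pvRotK_mem : ∀ k < 8, pvRotK k ∈ pvRotsB := by decide

theorem pvRotsB_eq : pvRotsB = [pvRotK 0, pvRotK 1, pvRotK 2, pvRotK 3,
    pvRotK 4, pvRotK 5, pvRotK 6, pvRotK 7] := by decide

theorem pvOut_fact : ∀ k < 8,
    PySem.List.slice pvSeats (some ((k : Nat) : Int)) none ++
      PySem.List.slice pvSeats none (some ((k : Nat) : Int)) = pvRotK k := by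
  decide

-- the final string stage of A, applied to the number of a rotation
def pvDigits (n : Int) : List Int :=
  ((PySem.Int.toStr n).toList).map (fun i => (PySem.Int.ofStr? (String.ofList [i])).getD 0)

theorem pvDigits_num (r : List Int) (hr : r ∈ pvRotsB) : pvDigits (pvNumB r) = r := by
  simp only [pvRotsB, List.mem_cons, List.not_mem_nil, or_false] at hr
  rcases hr with rfl | rfl | rfl | rfl | rfl | rfl | rfl | rfl <;> decide

-- κ on the rotation equals the transposed cost-table entry
theorem pvCost_entry (p : List Int) (k : Nat) (hk : k < 8) :
    pvF (p.take 8) 0 (k : Int) = pvPoint p (pvRotK k) := by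
  have h := pvF_eq_point (p.take 8) 0 k (by simp) hk
  rw [show ((0 : Nat) : Int) = (0 : Int) from rfl] at h
  rw [h]
  simp only [List.drop_zero]
  unfold pvPoint
  rw [pvZipTake (pvRotK k) p 8 (by interval_cases k <;> decide)]

-- ===== VERDICT =====
theorem optimize_merry_go_round_spec : Claim_equal_optimize_merry_go_round := by
  unfold Claim_equal_optimize_merry_go_round
  intro p _hdom hpre
  unfold Spec_optimize_merry_go_round
  set κ := pvPoint p with hκ
  -- B's cost table
  have hslice : PySem.List.slice p none (some 8) = p.take 8 := by
    rw [show (8 : Int) = ((8 : Nat) : Int) from rfl, PySem.List.slice_to_natCast]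
  have hcost : (PySem.List.enumerate (PySem.List.slice p none (some 8)) 0).foldl
      stepOuterB (PySem.List.pyRepeat [0] 8) =
      [κ (pvRotK 0), κ (pvRotK 1), κ (pvRotK 2), κ (pvRotK 3),
       κ (pvRotK 4), κ (pvRotK 5), κ (pvRotK 6), κ (pvRotK 7)] := by
    rw [hslice]
    rw [show PySem.List.pyRepeat ([0] : List Int) 8 = [0,0,0,0,0,0,0,0] from by decide]
    rw [outer_eq]
    have h0 := pvCost_entry p 0 (by omega)
    have h1 := pvCost_entry p 1 (by omega)
    have h2 := pvCost_entry p 2 (by omega)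
    have h3 := pvCost_entry p 3 (by omega)
    have h4 := pvCost_entry p 4 (by omega)
    have h5 := pvCost_entry p 5 (by omega)
    have h6 := pvCost_entry p 6 (by omega)
    have h7 := pvCost_entry p 7 (by omega)
    simp only [Nat.cast_ofNat, Nat.cast_zero, Nat.cast_one] at h0 h1 h2 h3 h4 h5 h6 h7
    rw [← hκ] at h0 h1 h2 h3 h4 h5 h6 h7
    simp [h0, h1, h2, h3, h4, h5, h6, h7]
  set costL := [κ (pvRotK 0), κ (pvRotK 1), κ (pvRotK 2), κ (pvRotK 3),
       κ (pvRotK 4), κ (pvRotK 5), κ (pvRotK 6), κ (pvRotK 7)] with hcostL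
  set kc : Int → Int := fun k => PySem.List.pyGetD costL k 0 with hkcdef
  set kr : Int → Int := fun k => PySem.List.pyGetD pvRankL k 0 with hkrdef
  -- B's arg-min offset
  have hBne : ∃ m, PySem.List.min2? (PySem.List.pyRange 0 8 1) kc kr = some m := by
    rw [pyRange8, min2?_cons]
    exact pvStep2_some _ _ _ _
  obtain ⟨ks, hks⟩ := hBne
  have hksfacts := pvStep2_aux kc kr _ _ _ (by rw [pyRange8, min2?_cons] at hks; exact hks)
  have hksmem : ks = 0 ∨ ks ∈ ([1, 2, 3, 4, 5, 6, 7] : List Int) := hksfacts.1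
  have hkslex : ∀ y ∈ ([0, 1, 2, 3, 4, 5, 6, 7] : List Int), pvLexLE kc kr ks y := by
    intro y hy
    rcases List.mem_cons.mp hy with rfl | hy
    · exact hksfacts.2.1
    · exact hksfacts.2.2 y hy
  -- ks is a small natural
  have hksnat : ∃ kn : Nat, kn < 8 ∧ ks = (kn : Int) := by
    rcases hksmem with rfl | h
    · exact ⟨0, by omega, rfl⟩
    · simp only [List.mem_cons, List.not_mem_nil, or_false] at h
      rcases h with rfl | rfl | rfl | rfl | rfl | rfl | rfl
      · exact ⟨1, by omega, rfl⟩
      · exact ⟨2, by omega, rfl⟩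
      · exact ⟨3, by omega, rfl⟩
      · exact ⟨4, by omega, rfl⟩
      · exact ⟨5, by omega, rfl⟩
      · exact ⟨6, by omega, rfl⟩
      · exact ⟨7, by omega, rfl⟩
  obtain ⟨kn, hkn8, hkneq⟩ := hksnat
  -- kc reads back κ of the rotation
  have hkc : ∀ m : Nat, m < 8 → kc ((m : Int)) = κ (pvRotK m) := by
    intro m hm
    rw [hkcdef]
    simp only
    rw [PySem.List.pyGetD_natCast]
    interval_cases m <;> rfl
  set b := pvRotK kn with hb
  have hbmem : b ∈ pvRotsB := pvRotK_mem kn hkn8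
  -- b is lex-minimal among the rotations for (κ, pvNumB)
  have hblexκ : ∀ y ∈ pvRotsB, κ b < κ y ∨ (κ b = κ y ∧ pvNumB b ≤ pvNumB y) := by
    intro y hy
    rw [pvRotsB_eq] at hy
    simp only [List.mem_cons, List.not_mem_nil, or_false] at hy
    have hstep : ∀ m : Nat, m < 8 → y = pvRotK m →
        κ b < κ y ∨ (κ b = κ y ∧ pvNumB b ≤ pvNumB y) := by
      intro m hm hym
      have hmem : ((m : Int)) ∈ ([0, 1, 2, 3, 4, 5, 6, 7] : List Int) := by
        interval_cases m <;> simp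
      have hlex := hkslex _ hmem
      rw [hkneq] at hlex
      unfold pvLexLE at hlex
      rw [hkc kn hkn8, hkc m hm] at hlex
      subst hym
      rcases hlex with h | ⟨h1, h2⟩
      · exact Or.inl h
      · refine Or.inr ⟨h1, ?_⟩
        have := (pvRank_fact kn hkn8 m hm).mp h2
        exact this
    rcases hy with rfl | rfl | rfl | rfl | rfl | rfl | rfl | rfl
    · exact hstep 0 (by omega) rfl
    · exact hstep 1 (by omega) rfl
    · exact hstep 2 (by omega) rfl
    · exact hstep 3 (by omega) rfl
    · exact hstep 4 (by omega) rfl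
    · exact hstep 5 (by omega) rfl
    · exact hstep 6 (by omega) rfl
    · exact hstep 7 (by omega) rfl
  -- B's value
  have hBval : optimize_merry_go_round_alt p = b := by
    unfold optimize_merry_go_round_alt
    simp only
    rw [show (fun k => PySem.List.pyGetD
        ((PySem.List.enumerate (PySem.List.slice p none (some 8)) 0).foldl stepOuterB
          (PySem.List.pyRepeat [0] 8)) k 0) = kc from by rw [hkcdef, hcost]]
    rw [show (fun k => PySem.List.pyGetD ([7, 2, 6, 0, 4, 1, 5, 3] : List Int) k 0) = kr from rfl]
    rw [hks]
    simp only [Option.getD_some]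
    rw [hkneq]
    exact pvOut_fact kn hkn8
  -- A's loop result
  set M := (pvRotsA.map κ).foldl min ((10 : Int) ^ 10) with hM
  have hA : optimize_merry_go_round p =
      pvDigits ((PySem.List.min?
        ((pvRotsA.filter (fun r => decide (κ r = M))).map pvNumB) (fun x => x)).getD 0) := by
    unfold optimize_merry_go_round
    rw [foldA_eq, stepMS_spec]
    simp only [ite_self, List.nil_append, List.map_map, ← hκ, ← hM]
    rfl
  -- Pre gives some rotation with cost ≤ 10^10
  obtain ⟨r0, hr0mem, hr0le⟩ := hpre
  have hr0B : r0 ∈ pvRotsB := by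
    simp only [pvRotsB]
    simpa using hr0mem
  have hr0A : r0 ∈ pvRotsA := (mem_rotsA_iff r0).mpr hr0B
  have hr0κ : κ r0 ≤ (10 : Int) ^ 10 := hr0le
  have hMle : ∀ y ∈ pvRotsA, M ≤ κ y := by
    intro y hy
    exact pvFoldlMin_le_mem _ _ _ (List.mem_map.mpr ⟨y, hy, rfl⟩)
  have hbA : b ∈ pvRotsA := (mem_rotsA_iff b).mpr hbmem
  -- the cost of b is the loop's final minimum
  have hκbM : κ b = M := by
    have h1 : M ≤ κ b := hMle b hbA
    have h2 : κ b ≤ M := by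
      rcases pvFoldlMin_cases (pvRotsA.map κ) ((10 : Int) ^ 10) with hc | hc
      · rw [← hM] at hc
        have := hMle r0 hr0A
        have hble : κ b ≤ κ r0 := by
          rcases hblexκ r0 hr0B with h | ⟨h, _⟩ <;> omega
        omega
      · rw [← hM] at hc
        rcases List.mem_map.mp hc with ⟨y, hy, hyeq⟩
        have hyB : y ∈ pvRotsB := (mem_rotsA_iff y).mp hy
        rcases hblexκ y hyB with h | ⟨h, _⟩ <;> omega
    omega
  -- b is in the tie list, whose minimal number is pvNumB b
  have hbfil : b ∈ pvRotsA.filter (fun r => decide (κ r = M)) :=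
    List.mem_filter.mpr ⟨hbA, by simp [hκbM]⟩
  have hnumb_mem : pvNumB b ∈ (pvRotsA.filter (fun r => decide (κ r = M))).map pvNumB :=
    List.mem_map.mpr ⟨b, hbfil, rfl⟩
  have hminne : ∃ amin, PySem.List.min?
      ((pvRotsA.filter (fun r => decide (κ r = M))).map pvNumB) (fun x => x) = some amin := by
    rcases Option.eq_none_or_eq_some (PySem.List.min?
      ((pvRotsA.filter (fun r => decide (κ r = M))).map pvNumB) (fun x => x)) with h | h
    · exfalso
      rw [PySem.List.min?_eq_none_iff] at h
      rw [h] at hnumb_mem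
      simp at hnumb_mem
    · exact h
  obtain ⟨amin, hamin⟩ := hminne
  have haminmem := PySem.List.min?_mem hamin
  have haminmin := PySem.List.min?_isMin hamin
  have hamin_le : amin ≤ pvNumB b := haminmin _ hnumb_mem
  have hb_le : pvNumB b ≤ amin := by
    rcases List.mem_map.mp haminmem with ⟨r, hrfil, hreq⟩
    have hrA := (List.mem_filter.mp hrfil).1
    have hrκ : κ r = M := by
      have := (List.mem_filter.mp hrfil).2
      simpa using this
    have hrB : r ∈ pvRotsB := (mem_rotsA_iff r).mp hrA
    rcases hblexκ r hrB with h | ⟨_, h⟩ <;> omega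
  have haminb : amin = pvNumB b := le_antisymm hamin_le hb_le
  rw [hA, hamin, hBval]
  simp only [Option.getD_some, haminb]
  exact pvDigits_num b hbmem
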